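-- pv_equiv track=rewrite | github.com/claudialbzz/imat2 | FIA/P3/MinMax.py | minimax_con_secuencia
-- ===== SOURCE A (Python) =====
-- def minimax_con_secuencia(n, es_max, camino=None):
--     if camino is None:
--         camino = []
--
--     # Mostrar el estado actual
--     estado_actual = f"{n} (Turno: {'MAX' if es_max else 'MIN'})"
--
--     # Caso base: si llegamos a 0, el jugador anterior ganó
--     if n == 0:
--         ganador = "MIN" if es_max else "MAX"
--         camino_final = camino + [f"0 → GANA {ganador}"]
--         return (1 if ganador == "MAX" else -1, camino_final)
--
--     if es_max:
--         mejor_valor = -2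
--         mejor_camino = None
--
--         # Opción RESTAR 1
--         if n-1 >= 0:
--             valor, cam = minimax_con_secuencia(n-1, False, camino + [f"{n} -1"])
--             if valor > mejor_valor:
--                 mejor_valor = valor
--                 mejor_camino = cam
--
--         # Opción DIVIDIR entre 2
--         if n//2 >= 0:
--             valor, cam = minimax_con_secuencia(n//2, False, camino + [f"{n} ÷2"])
--             if valor > mejor_valor:
--                 mejor_valor = valor
--                 mejor_camino = cam
--
--         return (mejor_valor, mejor_camino)
--
--     else:  # Turno de MIN
--         mejor_valor = 2
--         mejor_camino = None
--
--         # Opción RESTAR 1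
--         if n-1 >= 0:
--             valor, cam = minimax_con_secuencia(n-1, True, camino + [f"{n} -1"])
--             if valor < mejor_valor:
--                 mejor_valor = valor
--                 mejor_camino = cam
--
--         # Opción DIVIDIR entre 2
--         if n//2 >= 0:
--             valor, cam = minimax_con_secuencia(n//2, True, camino + [f"{n} ÷2"])
--             if valor < mejor_valor:
--                 mejor_valor = valor
--                 mejor_camino = cam
--
--         return (mejor_valor, mejor_camino)
-- ===== SOURCE B (Python) =====
-- def minimax_con_secuencia(n, es_max, camino=None):
--     # Bottom-up DP over k = 0..n: for each k and each turn, the game value and the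
--     # path suffix (relative to the given camino prefix). O(n) instead of exponential.
--     if camino is None:
--         camino = []
--     vmax, pmax = [-1], [["0 → GANA MIN"]]   # at 0 on MAX's turn, MIN already won
--     vmin, pmin = [1], [["0 → GANA MAX"]]
--     for k in range(1, n + 1):
--         h = k // 2
--         # MAX to move at k: prefer "-1" unless "÷2" is strictly better
--         v1, p1 = vmin[k - 1], [f"{k} -1"] + pmin[k - 1]
--         v2, p2 = vmin[h], [f"{k} ÷2"] + pmin[h]
--         if v2 > v1:
--             vmax.append(v2); pmax.append(p2)
--         else:
--             vmax.append(v1); pmax.append(p1)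
--         # MIN to move at k
--         w1, q1 = vmax[k - 1], [f"{k} -1"] + pmax[k - 1]
--         w2, q2 = vmax[h], [f"{k} ÷2"] + pmax[h]
--         if w2 < w1:
--             vmin.append(w2); pmin.append(q2)
--         else:
--             vmin.append(w1); pmin.append(q1)
--     if es_max:
--         return (vmax[n], camino + pmax[n])
--     else:
--         return (vmin[n], camino + pmin[n])
-- ===== Notes on version B (the rewrite author's own statement) =====
-- stated objective: faster
-- what changed: replaces the exponential two-branch minimax recursion by a bottom-up dynamic program that tabulates, for every k from 0 to n and for each player to move, the game value and the path suffix, then prepends camino once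
-- outside the precondition, e.g. on minimax_con_secuencia(-1, True, None): A returns (-2, None), B returns (-1, ['0 → GANA MIN'])
import Mathlib
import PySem

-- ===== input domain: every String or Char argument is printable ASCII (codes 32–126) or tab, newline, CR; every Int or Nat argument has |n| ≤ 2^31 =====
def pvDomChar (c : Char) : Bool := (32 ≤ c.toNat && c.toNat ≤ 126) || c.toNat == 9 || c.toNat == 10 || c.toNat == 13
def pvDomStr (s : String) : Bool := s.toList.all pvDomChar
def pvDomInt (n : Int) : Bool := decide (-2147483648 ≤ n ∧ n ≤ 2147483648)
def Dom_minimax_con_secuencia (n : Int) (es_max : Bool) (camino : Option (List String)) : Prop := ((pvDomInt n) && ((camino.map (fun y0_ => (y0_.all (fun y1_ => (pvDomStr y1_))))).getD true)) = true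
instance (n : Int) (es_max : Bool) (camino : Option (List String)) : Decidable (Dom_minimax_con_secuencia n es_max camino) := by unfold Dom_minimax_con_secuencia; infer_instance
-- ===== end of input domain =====

-- B replaces A's exponential minimax recursion by a bottom-up O(n) table of (value, path suffix) per player; equal on all n ≥ 0.



-- ===== PORT A =====
-- literal port of A; `best` carries (mejor_valor, mejor_camino) with mejor_camino : Option.
-- The final `.getD []` renders Python's `None` result, reached only when n < 0 (outside Pre_).
def minimax_con_secuencia (n : Int) (es_max : Bool) (camino : Option (List String)) : Int × List String :=
  let camino := camino.getD []
  if n = 0 then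
    let ganador := if es_max then "MIN" else "MAX"
    let camino_final := camino ++ ["0 → GANA " ++ ganador]
    ((if ganador = "MAX" then 1 else -1), camino_final)
  else if es_max then
    let best : Int × Option (List String) := (-2, none)
    let best :=
      if 0 ≤ n - 1 then
        let vc := minimax_con_secuencia (n - 1) false (some (camino ++ [PySem.Int.toStr n ++ " -1"]))
        if vc.1 > best.1 then (vc.1, some vc.2) else best
      else best
    let best :=
      if 0 ≤ PySem.Int.floordiv n 2 then
        let vc := minimax_con_secuencia (PySem.Int.floordiv n 2) false (some (camino ++ [PySem.Int.toStr n ++ " ÷2"]))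
        if vc.1 > best.1 then (vc.1, some vc.2) else best
      else best
    (best.1, best.2.getD [])
  else
    let best : Int × Option (List String) := (2, none)
    let best :=
      if 0 ≤ n - 1 then
        let vc := minimax_con_secuencia (n - 1) true (some (camino ++ [PySem.Int.toStr n ++ " -1"]))
        if vc.1 < best.1 then (vc.1, some vc.2) else best
      else best
    let best :=
      if 0 ≤ PySem.Int.floordiv n 2 then
        let vc := minimax_con_secuencia (PySem.Int.floordiv n 2) true (some (camino ++ [PySem.Int.toStr n ++ " ÷2"]))
        if vc.1 < best.1 then (vc.1, some vc.2) else best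
      else best
    (best.1, best.2.getD [])
termination_by n.toNat
decreasing_by
  all_goals first
    | omega
    | (simp only [PySem.Int.floordiv_eq_ediv_of_pos (by norm_num : (0:Int) < 2)] at *; omega)

-- ===== PORT B =====
-- literal port of Source B: one foldl over range(1, n+1) maintaining the four tables
-- (vmax, pmax, vmin, pmin); list indexing is PySem.List.pyGetD (in range whenever Python's is).
def minimax_con_secuencia_alt (n : Int) (es_max : Bool) (camino : Option (List String)) : Int × List String :=
  let camino := camino.getD []
  let st :=
    (PySem.List.pyRange 1 (n + 1) 1).foldl
      (fun (st : (List Int × List (List String)) × (List Int × List (List String))) k =>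
        let vmax := st.1.1; let pmax := st.1.2
        let vmin := st.2.1; let pmin := st.2.2
        let h := PySem.Int.floordiv k 2
        let v1 := PySem.List.pyGetD vmin (k - 1) 0
        let p1 := (PySem.Int.toStr k ++ " -1") :: PySem.List.pyGetD pmin (k - 1) []
        let v2 := PySem.List.pyGetD vmin h 0
        let p2 := (PySem.Int.toStr k ++ " ÷2") :: PySem.List.pyGetD pmin h []
        let vmax' := if v2 > v1 then vmax ++ [v2] else vmax ++ [v1]
        let pmax' := if v2 > v1 then pmax ++ [p2] else pmax ++ [p1]
        let w1 := PySem.List.pyGetD vmax' (k - 1) 0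
        let q1 := (PySem.Int.toStr k ++ " -1") :: PySem.List.pyGetD pmax' (k - 1) []
        let w2 := PySem.List.pyGetD vmax' h 0
        let q2 := (PySem.Int.toStr k ++ " ÷2") :: PySem.List.pyGetD pmax' h []
        let vmin' := if w2 < w1 then vmin ++ [w2] else vmin ++ [w1]
        let pmin' := if w2 < w1 then pmin ++ [q2] else pmin ++ [q1]
        ((vmax', pmax'), (vmin', pmin')))
      (([-1], [["0 → GANA MIN"]]), ([1], [["0 → GANA MAX"]]))
  if es_max then
    (PySem.List.pyGetD st.1.1 n 0, camino ++ PySem.List.pyGetD st.1.2 n [])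
  else
    (PySem.List.pyGetD st.2.1 n 0, camino ++ PySem.List.pyGetD st.2.2 n [])

-- ===== PRECONDITION & SPEC =====
-- Pre_ excludes n < 0, where A's search finds no legal move and returns (±2, None) — None is not
-- a value of the declared list-of-strings result type — and n ≥ 998, where A's depth-(n+2)
-- recursion exceeds CPython's default recursion limit (1000) and raises RecursionError.
def Pre_minimax_con_secuencia (n : Int) (es_max : Bool) (camino : Option (List String)) : Prop := 0 ≤ n ∧ n ≤ 997
instance (n : Int) (es_max : Bool) (camino : Option (List String)) : Decidable (Pre_minimax_con_secuencia n es_max camino) := by unfold Pre_minimax_con_secuencia; infer_instance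
def pvWitness_minimax_con_secuencia : Int × Bool × Option (List String) := (3, true, some ["x"])

def Spec_minimax_con_secuencia (n : Int) (es_max : Bool) (camino : Option (List String)) (out : Int × List String) : Prop := out = minimax_con_secuencia_alt n es_max camino
instance (n : Int) (es_max : Bool) (camino : Option (List String)) (out : Int × List String) : Decidable (Spec_minimax_con_secuencia n es_max camino out) := by unfold Spec_minimax_con_secuencia; infer_instance

-- ===== CLAIM (what is proved, stated in full; the proofs are below) =====
def Claim_equal_minimax_con_secuencia : Prop := ∀ (n : Int) (es_max : Bool) (camino : Option (List String)), Dom_minimax_con_secuencia n es_max camino → Pre_minimax_con_secuencia n es_max camino → Spec_minimax_con_secuencia n es_max camino (minimax_con_secuencia n es_max camino)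

-- ===== LEMMAS AND PROOFS =====

-- Reference table: tab k = ((value, suffix) with MAX to move at k, (value, suffix) with MIN to move at k).
def tab : Nat → (Int × List String) × (Int × List String)
  | 0 => ((-1, ["0 → GANA MIN"]), (1, ["0 → GANA MAX"]))
  | (k + 1) =>
    let km := tab k
    let kh := tab ((k + 1) / 2)
    let v1 := km.2.1
    let p1 := (PySem.Int.toStr ((k : Int) + 1) ++ " -1") :: km.2.2
    let v2 := kh.2.1
    let p2 := (PySem.Int.toStr ((k : Int) + 1) ++ " ÷2") :: kh.2.2
    let w1 := km.1.1
    let q1 := (PySem.Int.toStr ((k : Int) + 1) ++ " -1") :: km.1.2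
    let w2 := kh.1.1
    let q2 := (PySem.Int.toStr ((k : Int) + 1) ++ " ÷2") :: kh.1.2
    ((if v2 > v1 then (v2, p2) else (v1, p1)), (if w2 < w1 then (w2, q2) else (w1, q1)))
termination_by k => k
decreasing_by all_goals omega

lemma tab_val_bound (k : Nat) :
    ((tab k).1.1 = 1 ∨ (tab k).1.1 = -1) ∧ ((tab k).2.1 = 1 ∨ (tab k).2.1 = -1) := by
  induction k using Nat.strong_induction_on with
  | _ k ih =>
    match k with
    | 0 => simp [tab]
    | (k + 1) =>
      have h1 := ih k (by omega)
      have h2 := ih ((k + 1) / 2) (by omega)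
      rw [tab]
      simp only []
      constructor <;> split_ifs <;> tauto

lemma A_eq_tab (k : Nat) (b : Bool) (c : List String) :
    minimax_con_secuencia (k : Int) b (some c) =
      ((if b then (tab k).1 else (tab k).2).1, c ++ (if b then (tab k).1 else (tab k).2).2) := by
  induction k using Nat.strong_induction_on generalizing b c with
  | _ k ih =>
    match k with
    | 0 =>
      cases b <;> (rw [minimax_con_secuencia.eq_def]; simp [tab])
    | (k + 1) =>
      have hb1 : (tab k).2.1 > -2 := by rcases (tab_val_bound k).2 with h | h <;> omega
      have hb2 : (tab ((k + 1) / 2)).2.1 > -2 := by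
        rcases (tab_val_bound ((k + 1) / 2)).2 with h | h <;> omega
      have hc1 : (tab k).1.1 < 2 := by rcases (tab_val_bound k).1 with h | h <;> omega
      have hc2 : (tab ((k + 1) / 2)).1.1 < 2 := by
        rcases (tab_val_bound ((k + 1) / 2)).1 with h | h <;> omega
      have hfd : PySem.Int.floordiv ((k + 1 : Nat) : Int) 2 = (((k + 1) / 2 : Nat) : Int) := by
        exact_mod_cast PySem.Int.floordiv_natCast (k + 1) 2
      have hne : ¬ (((k + 1 : Nat) : Int) = 0) := by push_cast; omega
      have hm1 : ((k + 1 : Nat) : Int) - 1 = (k : Int) := by push_cast; ring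
      have ihk := fun (b : Bool) (c : List String) => ih k (by omega) b c
      have ihh := fun (b : Bool) (c : List String) => ih ((k + 1) / 2) (by omega) b c
      cases b <;>
        (rw [minimax_con_secuencia.eq_def]
         simp only [Option.getD_some, hne, if_false, hfd, hm1, ihk, ihh]
         rw [tab]
         have hdiv2 : (0:Int) ≤ ((k : Int) + 1) / 2 := by omega
         simp [hb1, hc1, hdiv2]
         try (split_ifs <;> simp))

lemma B_fold_eq_tab (m : Nat) :
    (PySem.List.pyRange 1 ((m : Int) + 1) 1).foldl
      (fun (st : (List Int × List (List String)) × (List Int × List (List String))) k =>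
        let vmax := st.1.1; let pmax := st.1.2
        let vmin := st.2.1; let pmin := st.2.2
        let h := PySem.Int.floordiv k 2
        let v1 := PySem.List.pyGetD vmin (k - 1) 0
        let p1 := (PySem.Int.toStr k ++ " -1") :: PySem.List.pyGetD pmin (k - 1) []
        let v2 := PySem.List.pyGetD vmin h 0
        let p2 := (PySem.Int.toStr k ++ " ÷2") :: PySem.List.pyGetD pmin h []
        let vmax' := if v2 > v1 then vmax ++ [v2] else vmax ++ [v1]
        let pmax' := if v2 > v1 then pmax ++ [p2] else pmax ++ [p1]
        let w1 := PySem.List.pyGetD vmax' (k - 1) 0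
        let q1 := (PySem.Int.toStr k ++ " -1") :: PySem.List.pyGetD pmax' (k - 1) []
        let w2 := PySem.List.pyGetD vmax' h 0
        let q2 := (PySem.Int.toStr k ++ " ÷2") :: PySem.List.pyGetD pmax' h []
        let vmin' := if w2 < w1 then vmin ++ [w2] else vmin ++ [w1]
        let pmin' := if w2 < w1 then pmin ++ [q2] else pmin ++ [q1]
        ((vmax', pmax'), (vmin', pmin')))
      (([-1], [["0 → GANA MIN"]]), ([1], [["0 → GANA MAX"]]))
    = (((List.range (m + 1)).map (fun k => (tab k).1.1),
        (List.range (m + 1)).map (fun k => (tab k).1.2)),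
       ((List.range (m + 1)).map (fun k => (tab k).2.1),
        (List.range (m + 1)).map (fun k => (tab k).2.2))) := by
  induction m with
  | zero =>
    rw [show ((0 : Nat) : Int) + 1 = 1 by norm_num]
    rw [PySem.List.pyRange_one_eq_nil (by norm_num)]
    simp [tab]
  | succ m ih =>
    have hcast : ((m + 1 : Nat) : Int) + 1 = ((m : Int) + 1) + 1 := by push_cast; ring
    rw [hcast, PySem.List.pyRange_one_succ_right (by omega), List.foldl_append, ih]
    have h1 : m < m + 1 := by omega
    have h2 : (m + 1) / 2 < m + 1 := by omega
    have hidx : ((m : Int) + 1) - 1 = ((m : Nat) : Int) := by ring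
    have hfd : PySem.Int.floordiv ((m : Int) + 1) 2 = (((m + 1) / 2 : Nat) : Int) := by
      have h := PySem.Int.floordiv_natCast (m + 1) 2
      push_cast at h
      exact_mod_cast h
    have htabm : tab (m + 1) = (
      (if (tab ((m + 1) / 2)).2.1 > (tab m).2.1 then
         ((tab ((m + 1) / 2)).2.1, (PySem.Int.toStr ((m : Int) + 1) ++ " ÷2") :: (tab ((m + 1) / 2)).2.2)
       else ((tab m).2.1, (PySem.Int.toStr ((m : Int) + 1) ++ " -1") :: (tab m).2.2)),
      (if (tab ((m + 1) / 2)).1.1 < (tab m).1.1 then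
         ((tab ((m + 1) / 2)).1.1, (PySem.Int.toStr ((m : Int) + 1) ++ " ÷2") :: (tab ((m + 1) / 2)).1.2)
       else ((tab m).1.1, (PySem.Int.toStr ((m : Int) + 1) ++ " -1") :: (tab m).1.2))) := by
      rw [tab.eq_def]
    simp only [List.foldl_cons, List.foldl_nil, hidx, hfd, PySem.List.pyGetD_natCast,
      PySem.List.getD_map_range _ _ _ _ h1, PySem.List.getD_map_range _ _ _ _ h2]
    rw [show List.range (m + 1 + 1) = List.range (m + 1) ++ [m + 1] from List.range_succ]
    simp only [List.map_append, List.map_cons, List.map_nil, htabm]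
    by_cases hv : (tab ((m + 1) / 2)).2.1 > (tab m).2.1 <;>
      by_cases hw : (tab ((m + 1) / 2)).1.1 < (tab m).1.1 <;>
        simp [hv, hw, h1, h2, List.getElem?_append_left]

lemma B_eq_tab (k : Nat) (b : Bool) (c : List String) :
    minimax_con_secuencia_alt (k : Int) b (some c) =
      ((if b then (tab k).1 else (tab k).2).1, c ++ (if b then (tab k).1 else (tab k).2).2) := by
  have hf := B_fold_eq_tab k
  simp only [minimax_con_secuencia_alt, Option.getD_some]
  rw [hf]
  cases b <;> simp

lemma A_none_eq_some_nil (n : Int) (b : Bool) :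
    minimax_con_secuencia n b none = minimax_con_secuencia n b (some []) := by
  rw [minimax_con_secuencia.eq_def, minimax_con_secuencia.eq_def]
  rfl

lemma B_none_eq_some_nil (n : Int) (b : Bool) :
    minimax_con_secuencia_alt n b none = minimax_con_secuencia_alt n b (some []) := by
  rfl

-- ===== VERDICT (by name: the statement is the Claim_ definition above) =====
theorem minimax_con_secuencia_spec : Claim_equal_minimax_con_secuencia := by
  intro n b c _ hpre
  unfold Spec_minimax_con_secuencia
  have hpre' : 0 ≤ n := hpre.1
  obtain ⟨m, rfl⟩ : ∃ m : Nat, n = (m : Int) := ⟨n.toNat, (Int.toNat_of_nonneg hpre').symm⟩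
  cases c with
  | some c => rw [A_eq_tab, B_eq_tab]
  | none => rw [A_none_eq_some_nil, B_none_eq_some_nil, A_eq_tab, B_eq_tab]
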